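-- pv_equiv track=rewrite | github.com/UsLyX/PL_Salnikov | 9.1.py | max_from_sorted_rows
-- ===== SOURCE A (Python) =====
-- def is_sorted_ascending(row):
--     return all(row[i] <= row[i + 1] for i in range(len(row) - 1))
--
-- def is_sorted_descending(row):
--     return all(row[i] >= row[i + 1] for i in range(len(row) - 1))
--
-- def max_from_sorted_rows(matrix):
--     max_element = None
--
--
--     for row in matrix:
--
--         if is_sorted_ascending(row) or is_sorted_descending(row):
--
--             row_max = max(row)
--
--
--             if max_element is None or row_max > max_element:
--                 max_element = row_max
--
--     return max_element
-- ===== SOURCE B (Python) =====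
-- def max_from_sorted_rows(matrix):
--     candidates = [max(row) for row in matrix
--                   if list(row) == sorted(row) or list(row) == sorted(row, reverse=True)]
--     return max(candidates, default=None)
-- ===== Notes on version B (the rewrite author's own statement) =====
-- stated objective: idiomatic
-- what changed: B replaces the two adjacent-pair scanning helpers and the None-initialized running-maximum loop with a single comprehension that tests each row by comparing it to sorted(row) and sorted(row, reverse=True) and then takes max(candidates, default=None).
import Mathlib
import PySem

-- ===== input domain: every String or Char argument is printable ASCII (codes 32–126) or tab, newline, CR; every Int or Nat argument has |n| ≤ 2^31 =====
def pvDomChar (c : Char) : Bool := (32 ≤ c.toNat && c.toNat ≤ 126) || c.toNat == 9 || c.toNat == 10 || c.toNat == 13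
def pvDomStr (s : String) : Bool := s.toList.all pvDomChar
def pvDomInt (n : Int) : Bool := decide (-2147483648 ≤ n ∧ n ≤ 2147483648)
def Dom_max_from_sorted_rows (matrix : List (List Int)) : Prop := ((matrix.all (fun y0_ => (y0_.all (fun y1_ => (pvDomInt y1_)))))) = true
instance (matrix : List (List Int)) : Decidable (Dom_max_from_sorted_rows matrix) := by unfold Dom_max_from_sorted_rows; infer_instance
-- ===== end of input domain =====

-- B rewrites A's adjacent-pair helpers and running-maximum loop as one sorted-comparison
-- comprehension plus max(candidates, default=None): an idiomatic re-decomposition, not faster.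

-- ===== PORT A =====
def isSortedAscending (row : List Int) : Bool :=
  (PySem.List.pyRange 0 ((row.length : Int) - 1) 1).all
    (fun i => decide (PySem.List.pyGetD row i 0 ≤ PySem.List.pyGetD row (i + 1) 0))

def isSortedDescending (row : List Int) : Bool :=
  (PySem.List.pyRange 0 ((row.length : Int) - 1) 1).all
    (fun i => decide (PySem.List.pyGetD row i 0 ≥ PySem.List.pyGetD row (i + 1) 0))

def max_from_sorted_rows (matrix : List (List Int)) : Option Int :=
  matrix.foldl
    (fun max_element row =>
      if isSortedAscending row || isSortedDescending row then
        -- max(row) raises ValueError on an empty row; Pre_ excludes those inputs, so the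
        -- default 0 is never reached on admitted inputs
        let row_max := (PySem.List.max? row (fun x => x)).getD 0
        match max_element with
        | none => some row_max
        | some v => if row_max > v then some row_max else max_element
      else max_element)
    none

-- ===== PORT B =====
def rowIsMonotone (row : List Int) : Bool :=
  row == PySem.List.sorted row (fun x => x) || row == PySem.List.sorted row (fun x => x) true

def max_from_sorted_rows_alt (matrix : List (List Int)) : Option Int :=
  PySem.List.max?
    ((matrix.filter rowIsMonotone).map
      -- max(row) raises on an empty row; excluded by Pre_, default 0 never reached there
      (fun row => (PySem.List.max? row (fun x => x)).getD 0))
    (fun x => x)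

-- ===== PRECONDITION & SPEC =====
-- Pre_ excludes matrices containing an empty row: an empty row passes both monotonicity
-- tests, so Python A (and B) raise ValueError at max(row) there.
def Pre_max_from_sorted_rows (matrix : List (List Int)) : Prop := ∀ row ∈ matrix, row ≠ []
instance (matrix : List (List Int)) : Decidable (Pre_max_from_sorted_rows matrix) := by unfold Pre_max_from_sorted_rows; infer_instance
def pvWitness_max_from_sorted_rows : List (List Int) := [[1, 2], [3, 1, 2], [5, 4, 4]]

def Spec_max_from_sorted_rows (matrix : List (List Int)) (out : Option Int) : Prop := out = max_from_sorted_rows_alt matrix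
instance (matrix : List (List Int)) (out : Option Int) : Decidable (Spec_max_from_sorted_rows matrix out) := by unfold Spec_max_from_sorted_rows; infer_instance

-- ===== CLAIM (what is proved, stated in full; the proofs are below) =====
def Claim_equal_max_from_sorted_rows : Prop := ∀ (matrix : List (List Int)), Dom_max_from_sorted_rows matrix → Pre_max_from_sorted_rows matrix → Spec_max_from_sorted_rows matrix (max_from_sorted_rows matrix)

-- ===== LEMMAS AND PROOFS =====

-- A's adjacent-pair scan over range(len(row)-1) says exactly: the row is pairwise ordered.
lemma isSortedAscending_iff (row : List Int) :
    isSortedAscending row = true ↔ List.Pairwise (· ≤ ·) row := by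
  rw [← List.isChain_iff_pairwise, List.isChain_iff_getElem]
  unfold isSortedAscending
  rw [List.all_eq_true]
  constructor
  · intro h i hi
    have hmem : (i : Int) ∈ PySem.List.pyRange 0 ((row.length : Int) - 1) 1 := by
      rw [PySem.List.mem_pyRange_one]; omega
    have := h _ hmem
    rw [decide_eq_true_iff,
        PySem.List.pyGetD_eq_getElem row 0 (by omega) (by push_cast; omega),
        PySem.List.pyGetD_eq_getElem row 0 (by omega) (by push_cast; omega)] at this
    simpa using this
  · intro h i hmem
    rw [PySem.List.mem_pyRange_one] at hmem
    rw [decide_eq_true_iff,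
        PySem.List.pyGetD_eq_getElem row 0 (by omega) (by omega),
        PySem.List.pyGetD_eq_getElem row 0 (by omega) (by omega)]
    have := h i.toNat (by omega)
    convert this using 2 <;> omega

lemma isSortedDescending_iff (row : List Int) :
    isSortedDescending row = true ↔ List.Pairwise (fun a b : Int => b ≤ a) row := by
  rw [← List.isChain_iff_pairwise, List.isChain_iff_getElem]
  unfold isSortedDescending
  rw [List.all_eq_true]
  constructor
  · intro h i hi
    have hmem : (i : Int) ∈ PySem.List.pyRange 0 ((row.length : Int) - 1) 1 := by
      rw [PySem.List.mem_pyRange_one]; omega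
    have := h _ hmem
    rw [decide_eq_true_iff,
        PySem.List.pyGetD_eq_getElem row 0 (by omega) (by push_cast; omega),
        PySem.List.pyGetD_eq_getElem row 0 (by omega) (by push_cast; omega)] at this
    simpa using this
  · intro h i hmem
    rw [PySem.List.mem_pyRange_one] at hmem
    rw [decide_eq_true_iff,
        PySem.List.pyGetD_eq_getElem row 0 (by omega) (by omega),
        PySem.List.pyGetD_eq_getElem row 0 (by omega) (by omega), ge_iff_le]
    have := h i.toNat (by omega)
    convert this using 2 <;> omega

-- A's adjacent-pair test and B's sorted-comparison test coincide.
lemma pred_eq (row : List Int) :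
    (isSortedAscending row || isSortedDescending row) = rowIsMonotone row := by
  unfold rowIsMonotone
  rw [Bool.eq_iff_iff]
  simp only [Bool.or_eq_true, beq_iff_eq,
    isSortedAscending_iff, isSortedDescending_iff]
  constructor
  · rintro (h | h)
    · exact Or.inl (PySem.List.sorted_eq_self_of_pairwise row _ h).symm
    · exact Or.inr (PySem.List.sorted_rev_eq_self_of_pairwise row _ h).symm
  · rintro (h | h)
    · exact Or.inl (h ▸ PySem.List.sorted_pairwise row _)
    · exact Or.inr (h ▸ PySem.List.sorted_pairwise_rev row _)

lemma foldl_max_eq (l : List Int) (x : Int) :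
    l.foldl max x = (PySem.List.max? l (fun y => y)).elim x (max x) := by
  induction l generalizing x with
  | nil => rfl
  | cons a t ih =>
    rw [PySem.List.max?_id_cons]
    simp only [List.foldl_cons, ih (max x a)]
    cases ht : PySem.List.max? t (fun y => y) with
    | none =>
      have : t = [] := (PySem.List.max?_eq_none_iff t (fun y => y)).mp ht
      subst this; rfl
    | some m =>
      have h2 : t.foldl max a = max a m := by
        have := ih a
        rw [ht] at this; simpa using this
      simp [Option.elim, h2, max_assoc]

lemma max?_cons_eq (x : Int) (l : List Int) :
    PySem.List.max? (x :: l) (fun y => y)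
      = some ((PySem.List.max? l (fun y => y)).elim x (max x)) := by
  rw [PySem.List.max?_id_cons, foldl_max_eq]

-- the option-level merge A's running maximum performs
def omax : Option Int → Option Int → Option Int
  | none, b => b
  | some v, none => some v
  | some v, some m => some (max v m)

lemma omax_omax (a : Option Int) (m : Int) (o : Option Int) :
    omax (omax a (some m)) o = omax a (some (o.elim m (max m))) := by
  cases a <;> cases o <;> simp [omax, Option.elim, max_assoc]

def candidates (rows : List (List Int)) : List Int :=
  (rows.filter rowIsMonotone).map (fun row => (PySem.List.max? row (fun x => x)).getD 0)

lemma fold_merge (rows : List (List Int)) (acc : Option Int) :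
    rows.foldl
      (fun max_element row =>
        if isSortedAscending row || isSortedDescending row then
          let row_max := (PySem.List.max? row (fun x => x)).getD 0
          match max_element with
          | none => some row_max
          | some v => if row_max > v then some row_max else max_element
        else max_element)
      acc
    = omax acc (PySem.List.max? (candidates rows) (fun y => y)) := by
  induction rows generalizing acc with
  | nil => cases acc <;> rfl
  | cons r t ih =>
    rw [List.foldl_cons]
    by_cases hp : rowIsMonotone r = true
    · have hcand : candidates (r :: t)
          = (PySem.List.max? r (fun x => x)).getD 0 :: candidates t := by
        unfold candidates; rw [List.filter_cons_of_pos hp, List.map_cons]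
      have hstep :
          (if isSortedAscending r || isSortedDescending r then
            let row_max := (PySem.List.max? r (fun x => x)).getD 0
            match acc with
            | none => some row_max
            | some v => if row_max > v then some row_max else acc
          else acc)
          = omax acc (some ((PySem.List.max? r (fun x => x)).getD 0)) := by
        rw [pred_eq, if_pos hp]
        cases acc with
        | none => rfl
        | some v =>
          simp only [omax]
          split_ifs with h <;> simp <;> omega
      rw [hstep, ih, hcand, max?_cons_eq, omax_omax]
    · have hcand : candidates (r :: t) = candidates t := by
        unfold candidates
        rw [List.filter_cons_of_neg (by simpa using hp)]
      have hstep :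
          (if isSortedAscending r || isSortedDescending r then
            let row_max := (PySem.List.max? r (fun x => x)).getD 0
            match acc with
            | none => some row_max
            | some v => if row_max > v then some row_max else acc
          else acc) = acc := by
        rw [pred_eq, if_neg (by simpa using hp)]
      rw [hstep, ih, hcand]

-- ===== VERDICT (by name: the statement is the Claim_ definition above) =====
theorem max_from_sorted_rows_spec : Claim_equal_max_from_sorted_rows := by
  intro matrix _ _
  unfold Spec_max_from_sorted_rows max_from_sorted_rows
  rw [fold_merge]
  have h : max_from_sorted_rows_alt matrix
      = PySem.List.max? (candidates matrix) (fun y => y) := rfl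
  rw [h]
  cases PySem.List.max? (candidates matrix) (fun y => y) <;> rfl
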